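-- pv_equiv track=rewrite | github.com/HadarKlimovski/HadarsAssignments | day09/analyze.py | find_longest_gc_sequence
-- ===== SOURCE A (Python) =====
-- def find_longest_gc_sequence(sequence):
--     max_length = 0
--     max_seq = ""
--     current_length = 0
--     current_seq = ""
--
--     for base in sequence:
--         if base in "GCgc":
--             current_length += 1
--             current_seq += base
--         else:
--             if current_length > max_length:
--                 max_length = current_length
--                 max_seq = current_seq
--             current_length = 0
--             current_seq = ""
--
--     # Check the last sequence if it was the longest
--     if current_length > max_length:
--         max_length = current_length
--         max_seq = current_seq
--
--     return max_seq
-- ===== SOURCE B (Python) =====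
-- def find_longest_gc_sequence(sequence):
--     # Two-pointer scan: jump over each maximal GC run at once and keep the longest slice found.
--     seq = list(sequence)
--     n = len(seq)
--     best = []
--     i = 0
--     while i < n:
--         if seq[i] in "GCgc":
--             j = i
--             while j < n and seq[j] in "GCgc":
--                 j += 1
--             if j - i > len(best):
--                 best = seq[i:j]
--             i = j
--         else:
--             i += 1
--     return "".join(best)
-- ===== Notes on version B (the rewrite author's own statement) =====
-- stated objective: alternative
-- what changed: A accumulates a current run character by character alongside the running best; B does a two-pointer scan that locates the end of each maximal GC run at once and keeps the longest slice, never building non-winning state incrementally.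
import Mathlib
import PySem

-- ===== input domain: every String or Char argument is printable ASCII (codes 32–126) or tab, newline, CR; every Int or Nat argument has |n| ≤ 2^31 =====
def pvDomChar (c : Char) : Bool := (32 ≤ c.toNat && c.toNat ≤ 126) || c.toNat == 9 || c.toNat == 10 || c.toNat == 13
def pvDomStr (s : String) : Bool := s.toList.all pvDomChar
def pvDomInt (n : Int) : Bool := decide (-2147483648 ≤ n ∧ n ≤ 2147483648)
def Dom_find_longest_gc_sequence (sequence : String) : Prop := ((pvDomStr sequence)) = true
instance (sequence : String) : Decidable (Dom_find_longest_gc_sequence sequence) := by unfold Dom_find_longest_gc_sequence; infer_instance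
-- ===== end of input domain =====

-- B replaces A's running current/best string accumulation with a two-pointer scan that
-- jumps over each maximal GC run and keeps the longest slice (objective: alternative).

-- shared helper: Python's `base in "GCgc"` for a single character
def gcBase (c : Char) : Bool := c == 'G' || c == 'C' || c == 'g' || c == 'c'

-- ===== PORT A =====
-- A's loop state: max_length, max_seq, current_length, current_seq
def gcLoopA : Nat → List Char → Nat → List Char → List Char → List Char
  | _maxLen, maxSeq, curLen, curSeq, [] =>
      if curLen > _maxLen then curSeq else maxSeq
  | maxLen, maxSeq, curLen, curSeq, c :: t =>
      if gcBase c then gcLoopA maxLen maxSeq (curLen + 1) (curSeq ++ [c]) t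
      else if curLen > maxLen then gcLoopA curLen curSeq 0 [] t
      else gcLoopA maxLen maxSeq 0 [] t

def find_longest_gc_sequence (sequence : String) : String :=
  String.ofList (gcLoopA 0 [] 0 [] sequence.toList)

-- ===== PORT B =====
-- B's outer while loop; the inner `while j < n and seq[j] in "GCgc"` that finds the end of a
-- run corresponds to takeWhile/dropWhile (run = seq[i:j], rest resumes at i = j).
def gcLoopB (l : List Char) (best : List Char) : List Char :=
  match l with
  | [] => best
  | c :: t =>
      if gcBase c then
        let run := c :: t.takeWhile gcBase
        let rest := t.dropWhile gcBase
        gcLoopB rest (if run.length > best.length then run else best)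
      else gcLoopB t best
  termination_by l.length
  decreasing_by
  · simpa using Nat.lt_succ_of_le (List.length_dropWhile_le gcBase t)
  · simp

def find_longest_gc_sequence_alt (sequence : String) : String :=
  String.ofList (gcLoopB sequence.toList [])

-- ===== PRECONDITION & SPEC =====
def Spec_find_longest_gc_sequence (sequence : String) (out : String) : Prop := out = find_longest_gc_sequence_alt sequence
instance (sequence : String) (out : String) : Decidable (Spec_find_longest_gc_sequence sequence out) := by unfold Spec_find_longest_gc_sequence; infer_instance

-- ===== CLAIM (what is proved, stated in full; the proofs are below) =====
def Claim_equal_find_longest_gc_sequence : Prop := ∀ (sequence : String), Dom_find_longest_gc_sequence sequence → Spec_find_longest_gc_sequence sequence (find_longest_gc_sequence sequence)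

-- ===== LEMMAS AND PROOFS =====

-- proof-side abstraction: the list of maximal GC runs, and the first-wins longest pick
def gcRuns (l : List Char) : List (List Char) :=
  match l with
  | [] => []
  | c :: t =>
      if gcBase c then (c :: t.takeWhile gcBase) :: gcRuns (t.dropWhile gcBase)
      else gcRuns t
  termination_by l.length
  decreasing_by
  · simpa using Nat.lt_succ_of_le (List.length_dropWhile_le gcBase t)
  · simp

def gcPick (b r : List Char) : List Char := if r.length > b.length then r else b

theorem gcLoopB_eq_foldl : ∀ (n : Nat) (l b : List Char), l.length ≤ n →
    gcLoopB l b = List.foldl gcPick b (gcRuns l) := by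
  intro n
  induction n with
  | zero =>
      intro l b h
      have : l = [] := List.eq_nil_of_length_eq_zero (Nat.le_zero.mp h)
      subst this; simp [gcLoopB, gcRuns]
  | succ n ih =>
      intro l b h
      match l with
      | [] => simp [gcLoopB, gcRuns]
      | c :: t =>
        by_cases hc : gcBase c
        · rw [gcLoopB, gcRuns]
          simp only [hc, if_pos]
          rw [List.foldl_cons]
          exact ih _ _ (le_trans (List.length_dropWhile_le gcBase t)
            (Nat.le_of_succ_le_succ h))
        · rw [gcLoopB, gcRuns]
          simp only [hc, if_neg, Bool.false_eq_true, not_false_iff]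
          exact ih _ _ (Nat.le_of_succ_le_succ h)

-- dropping the (possibly empty) leading run split does not change the fold
theorem gcRuns_head_absorb (t : List Char) (b : List Char) :
    List.foldl gcPick b (t.takeWhile gcBase :: gcRuns (t.dropWhile gcBase)) =
      List.foldl gcPick b (gcRuns t) := by
  match t with
  | [] => simp [gcRuns, gcPick]
  | c :: t' =>
    by_cases hc : gcBase c
    · simp [gcRuns, hc]
    · simp [gcRuns, hc, gcPick]

theorem gcLoopA_eq_foldl : ∀ (l : List Char) (ms cs : List Char),
    gcLoopA ms.length ms cs.length cs l =
      List.foldl gcPick ms ((cs ++ l.takeWhile gcBase) :: gcRuns (l.dropWhile gcBase)) := by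
  intro l
  induction l with
  | nil =>
      intro ms cs
      simp [gcLoopA, gcRuns, gcPick]
  | cons c t ih =>
      intro ms cs
      by_cases hc : gcBase c
      · rw [gcLoopA]
        simp only [hc, if_pos]
        have h1 : cs.length + 1 = (cs ++ [c]).length := by simp
        rw [h1, ih ms (cs ++ [c])]
        simp [hc]
      · rw [gcLoopA]
        simp only [hc, Bool.false_eq_true, if_false]
        have key : ∀ ms' : List Char, gcLoopA ms'.length ms' 0 [] t =
            List.foldl gcPick ms' (t.takeWhile gcBase :: gcRuns (t.dropWhile gcBase)) := by
          intro ms'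
          have := ih ms' []
          simpa using this
        have hstep : (if cs.length > ms.length then gcLoopA cs.length cs 0 [] t
            else gcLoopA ms.length ms 0 [] t) =
            List.foldl gcPick (gcPick ms cs) (t.takeWhile gcBase :: gcRuns (t.dropWhile gcBase)) := by
          unfold gcPick
          split_ifs with h
          · exact key cs
          · exact key ms
        rw [hstep, gcRuns_head_absorb]
        simp [hc, gcRuns, gcPick]

-- ===== VERDICT (by name: the statement is the Claim_ definition above) =====
theorem find_longest_gc_sequence_spec : Claim_equal_find_longest_gc_sequence := by
  intro s _
  unfold Spec_find_longest_gc_sequence find_longest_gc_sequence find_longest_gc_sequence_alt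
  congr 1
  have hA := gcLoopA_eq_foldl s.toList [] []
  simp only [List.length_nil, List.nil_append] at hA
  rw [hA, gcRuns_head_absorb]
  exact (gcLoopB_eq_foldl s.toList.length s.toList [] le_rfl).symm
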